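-- pv_equiv track=rewrite | github.com/praty170122032/Knowledge-Panel | Normalisation_Naviga1_NER/Normalization_Helper.py | get_postProcessigUnits
-- ===== SOURCE A (Python) =====
-- def get_postProcessigUnits(connected_comp):
--     connected_comp_short_ = sorted([list(comp) for comp in connected_comp if len(comp) == 2], key=lambda x:x[0])
--     connected_comp_long_ = sorted([list(comp) for comp in connected_comp if len(comp) > 2], key=lambda x:x[0])
--     connected_comp_all_ = sorted([list(comp) for comp in connected_comp], key=lambda x:x[0])
--
--     connected_comp_short = [(i, comp) for i, comp in enumerate(connected_comp_short_)]
--     connected_comp_long = [(i, comp) for i, comp in enumerate(connected_comp_long_)]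
--     connected_comp_all = [(i, comp) for i, comp in enumerate(connected_comp_all_)]
--
--     return connected_comp_short, connected_comp_long, connected_comp_all
-- ===== SOURCE B (Python) =====
-- def get_postProcessigUnits(connected_comp):
--     # Sort every component list once; the short/long lists are stable filters of it.
--     connected_comp_all_ = sorted([list(comp) for comp in connected_comp], key=lambda x: x[0])
--     connected_comp_short_ = [comp for comp in connected_comp_all_ if len(comp) == 2]
--     connected_comp_long_ = [comp for comp in connected_comp_all_ if len(comp) > 2]
--     return (list(enumerate(connected_comp_short_)),
--             list(enumerate(connected_comp_long_)),
--             list(enumerate(connected_comp_all_)))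
-- ===== Notes on version B (the rewrite author's own statement) =====
-- stated objective: simpler
-- what changed: B sorts the full component list once and obtains the short/long lists as stable filters of that single sorted list, instead of A's three independent filter-then-sort passes.
import Mathlib
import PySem

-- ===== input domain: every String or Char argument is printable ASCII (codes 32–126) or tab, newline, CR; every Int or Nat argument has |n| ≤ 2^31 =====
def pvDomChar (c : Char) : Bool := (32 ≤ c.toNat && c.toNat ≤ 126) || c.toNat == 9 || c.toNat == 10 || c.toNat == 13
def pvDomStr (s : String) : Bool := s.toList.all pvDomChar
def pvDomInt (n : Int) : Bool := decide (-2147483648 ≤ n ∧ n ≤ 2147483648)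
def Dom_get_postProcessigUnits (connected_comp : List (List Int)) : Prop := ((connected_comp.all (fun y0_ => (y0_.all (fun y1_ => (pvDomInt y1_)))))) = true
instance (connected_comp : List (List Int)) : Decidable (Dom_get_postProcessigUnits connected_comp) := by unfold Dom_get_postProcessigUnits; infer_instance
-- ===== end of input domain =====

-- B sorts the full component list once and takes the short/long lists as stable filters
-- of it, instead of A's three independent filter-then-sort passes (objective: simpler).

-- ===== PORT A =====
-- key=lambda x:x[0] ported as pyGetD · 0 0; Pre_ excludes empty components, where Python's
-- x[0] raises IndexError (this is where the default 0 is never reached).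
def get_postProcessigUnits (connected_comp : List (List Int)) : (List (Int × List Int)) × (List (Int × List Int)) × (List (Int × List Int)) :=
  let connected_comp_short_ := PySem.List.sorted (connected_comp.filter (fun comp => comp.length == 2)) (fun x => PySem.List.pyGetD x 0 0)
  let connected_comp_long_ := PySem.List.sorted (connected_comp.filter (fun comp => 2 < comp.length)) (fun x => PySem.List.pyGetD x 0 0)
  let connected_comp_all_ := PySem.List.sorted connected_comp (fun x => PySem.List.pyGetD x 0 0)
  (PySem.List.enumerate connected_comp_short_, PySem.List.enumerate connected_comp_long_, PySem.List.enumerate connected_comp_all_)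

-- ===== PORT B =====
def get_postProcessigUnits_alt (connected_comp : List (List Int)) : (List (Int × List Int)) × (List (Int × List Int)) × (List (Int × List Int)) :=
  let connected_comp_all_ := PySem.List.sorted connected_comp (fun x => PySem.List.pyGetD x 0 0)
  let connected_comp_short_ := connected_comp_all_.filter (fun comp => comp.length == 2)
  let connected_comp_long_ := connected_comp_all_.filter (fun comp => 2 < comp.length)
  (PySem.List.enumerate connected_comp_short_, PySem.List.enumerate connected_comp_long_, PySem.List.enumerate connected_comp_all_)

-- ===== PRECONDITION & SPEC =====
-- Pre_ excludes inputs containing an empty component, on which Python A raises IndexError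
-- (the sort key comp[0]); B raises there too.
def Pre_get_postProcessigUnits (connected_comp : List (List Int)) : Prop := ∀ c ∈ connected_comp, c ≠ []
instance (connected_comp : List (List Int)) : Decidable (Pre_get_postProcessigUnits connected_comp) := by unfold Pre_get_postProcessigUnits; infer_instance
def pvWitness_get_postProcessigUnits : List (List Int) := [[3, 1], [2], [0, 5, 6], [3, 7]]

def Spec_get_postProcessigUnits (connected_comp : List (List Int)) (out : (List (Int × List Int)) × (List (Int × List Int)) × (List (Int × List Int))) : Prop := out = get_postProcessigUnits_alt connected_comp
instance (connected_comp : List (List Int)) (out : (List (Int × List Int)) × (List (Int × List Int)) × (List (Int × List Int))) : Decidable (Spec_get_postProcessigUnits connected_comp out) := by unfold Spec_get_postProcessigUnits; infer_instance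

-- ===== CLAIM (what is proved, stated in full; the proofs are below) =====
def Claim_equal_get_postProcessigUnits : Prop := ∀ (connected_comp : List (List Int)), Dom_get_postProcessigUnits connected_comp → Pre_get_postProcessigUnits connected_comp → Spec_get_postProcessigUnits connected_comp (get_postProcessigUnits connected_comp)

-- ===== LEMMAS AND PROOFS =====

-- Inserting x into a list all of whose elements come strictly after x puts x in front.
theorem insertBy_eq_cons_of_forall {α : Type} (before : α → α → Bool) (x : α) (s : List α)
    (h : ∀ z ∈ s, before x z = true) :
    PySem.List.insertBy before x s = x :: s := by
  cases s with
  | nil => rfl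
  | cons y ys => simp [PySem.List.insertBy, h y (by simp)]

-- Filtering commutes with a single stable insertion into a key-sorted list.
theorem filter_insertBy {α : Type} (key : α → Int) (p : α → Bool) (x : α) :
    ∀ s : List α, s.Pairwise (fun a b => key a ≤ key b) →
    (PySem.List.insertBy (fun a b => decide (key a < key b)) x s).filter p =
      (if p x then PySem.List.insertBy (fun a b => decide (key a < key b)) x (s.filter p)
       else s.filter p) := by
  intro s
  induction s with
  | nil => intro _; cases hx : p x <;> simp [PySem.List.insertBy, List.filter, hx]
  | cons y ys ih =>
    intro hp
    rw [List.pairwise_cons] at hp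
    by_cases hlt : key x < key y
    · -- x goes before y
      have h1 : PySem.List.insertBy (fun a b => decide (key a < key b)) x (y :: ys) = x :: y :: ys := by
        simp [PySem.List.insertBy, hlt]
      rw [h1]
      by_cases hy : p y = true
      · have h2 : PySem.List.insertBy (fun a b => decide (key a < key b)) x ((y :: ys).filter p)
            = x :: (y :: ys).filter p := by
          apply insertBy_eq_cons_of_forall
          intro z hz
          have hz' : z ∈ y :: ys := List.mem_of_mem_filter hz
          rcases List.mem_cons.mp hz' with rfl | hz'' 
          · simp [hlt]
          · have := hp.1 z hz''
            simp; omega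
        rw [h2]
        by_cases hx : p x = true <;> simp [hx, List.filter, hy]
      · have hy' : p y = false := by revert hy; cases p y <;> simp
        have hfil : (y :: ys).filter p = ys.filter p := by
          simp [List.filter, hy']
        have h2 : PySem.List.insertBy (fun a b => decide (key a < key b)) x (ys.filter p)
            = x :: ys.filter p := by
          apply insertBy_eq_cons_of_forall
          intro z hz
          have := hp.1 z (List.mem_of_mem_filter hz)
          simp; omega
        rw [hfil, h2]
        by_cases hx : p x = true <;> simp [hx, List.filter, hy]
    · -- x goes after y
      have h1 : PySem.List.insertBy (fun a b => decide (key a < key b)) x (y :: ys)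
          = y :: PySem.List.insertBy (fun a b => decide (key a < key b)) x ys := by
        simp [PySem.List.insertBy, hlt]
      rw [h1]
      by_cases hy : p y = true
      · have h2 : PySem.List.insertBy (fun a b => decide (key a < key b)) x ((y :: ys).filter p)
            = y :: PySem.List.insertBy (fun a b => decide (key a < key b)) x (ys.filter p) := by
          have hfil : (y :: ys).filter p = y :: ys.filter p := by simp [List.filter, hy]
          rw [hfil]; simp [PySem.List.insertBy, hlt]
        rw [h2]
        by_cases hx : p x = true <;>
          simp [List.filter, hy, hx, ih hp.2]
      · have hy' : p y = false := by revert hy; cases p y <;> simp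
        have hfil : (y :: ys).filter p = ys.filter p := by
          simp [List.filter, hy']
        rw [hfil]
        by_cases hx : p x = true <;>
          simp [List.filter, hy, hx, ih hp.2]

-- Filtering commutes with the stable sort: sorted(filter) = filter(sorted).
theorem filter_sorted {α : Type} (key : α → Int) (p : α → Bool) (xs : List α) :
    (PySem.List.sorted xs key false).filter p = PySem.List.sorted (xs.filter p) key false := by
  induction xs using List.reverseRecOn with
  | nil => rfl
  | append_singleton xs x ih =>
    have hA : PySem.List.sorted (xs ++ [x]) key false
        = PySem.List.insertBy (fun a b => decide (key a < key b)) x (PySem.List.sorted xs key false) := by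
      simp [PySem.List.sorted, List.foldl_append]
    have hpair : (PySem.List.sorted xs key false).Pairwise (fun a b => key a ≤ key b) :=
      PySem.List.sorted_pairwise xs key
    rw [hA, filter_insertBy key p x _ hpair, ih]
    by_cases hx : p x = true
    · have : (xs ++ [x]).filter p = xs.filter p ++ [x] := by simp [List.filter_append, hx]
      rw [this]
      simp [hx, PySem.List.sorted, List.foldl_append]
    · have hx' : p x = false := by revert hx; cases p x <;> simp
      have : (xs ++ [x]).filter p = xs.filter p := by simp [List.filter_append, hx']
      rw [this]
      simp [hx]

-- ===== VERDICT (by name: the statement is the Claim_ definition above) =====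
theorem get_postProcessigUnits_spec : Claim_equal_get_postProcessigUnits := by
  intro connected_comp _ _
  unfold Spec_get_postProcessigUnits get_postProcessigUnits get_postProcessigUnits_alt
  simp only
  rw [← filter_sorted (fun x => PySem.List.pyGetD x 0 0) (fun comp => comp.length == 2) connected_comp,
      ← filter_sorted (fun x => PySem.List.pyGetD x 0 0) (fun comp => decide (2 < comp.length)) connected_comp]
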